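-- pv_equiv track=rewrite | github.com/AlexEgorov85/koru-agent | core/components/services/json_parsing/robust_extractor.py | _fix_unbalanced
-- ===== SOURCE A (Python) =====
-- from typing import Optional, List, Tuple
--
-- def _fix_unbalanced(json_str: str) -> Tuple[str, bool]:
--     """
--     Исправить несбалансированные скобки в JSON.
--
--     ARGS:
--     - json_str: str — текст JSON
--
--     RETURNS:
--     - (fixed_json, success)
--     """
--     if not json_str:
--         return "", False
--
--     # Удалить trailing whitespace/мусор
--     stripped = json_str.rstrip()
--
--     # Найти последнюю значимую позицию
--     last_meaningful_idx = -1
--     for i in range(len(stripped) - 1, -1, -1):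
--         char = stripped[i]
--         if char in '}"\'0123456789' or char.isalpha():
--             last_meaningful_idx = i
--             break
--
--     if last_meaningful_idx == -1:
--         return "", False
--
--     core = stripped[:last_meaningful_idx + 1]
--
--     # Подсчитать баланс
--     brace_count = 0
--     bracket_count = 0
--     in_string = False
--     escape_next = False
--
--     for char in core:
--         if escape_next:
--             escape_next = False
--             continue
--
--         if char == '\\' and in_string:
--             escape_next = True
--             continue
--
--         if char == '"':
--             in_string = not in_string
--             continue
--
--         if not in_string:
--             if char == '{':
--                 brace_count += 1
--             elif char == '}':
--                 brace_count -= 1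
--             elif char == '[':
--                 bracket_count += 1
--             elif char == ']':
--                 bracket_count -= 1
--
--     # Добавить недостающие скобки
--     fixed = core
--
--     while bracket_count > 0:
--         fixed += ']'
--         bracket_count -= 1
--
--     while brace_count > 0:
--         fixed += '}'
--         brace_count -= 1
--
--     return fixed, True
-- ===== SOURCE B (Python) =====
-- from typing import Tuple
--
-- _MEANINGFUL = '}"\'0123456789'
--
--
-- def _strip_strings(s: str) -> str:
--     """Delete double-quoted string literals (escape-aware; an unterminated
--     string swallows the rest) by jumping indices instead of a char state machine."""
--     out = []
--     i = 0
--     n = len(s)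
--     while i < n:
--         c = s[i]
--         if c == '"':
--             i += 1
--             while i < n and s[i] != '"':
--                 i += 2 if s[i] == '\\' else 1
--             i += 1
--         else:
--             out.append(c)
--             i += 1
--     return ''.join(out)
--
--
-- def _fix_unbalanced(json_str: str) -> Tuple[str, bool]:
--     s = json_str.rstrip()
--     skip = 0
--     for ch in reversed(s):
--         if ch in _MEANINGFUL or ch.isalpha():
--             break
--         skip += 1
--     if skip == len(s):
--         return "", False
--     core = s[: len(s) - skip]
--     body = _strip_strings(core)
--     brace = body.count('{') - body.count('}')
--     bracket = body.count('[') - body.count(']')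
--     return core + ']' * bracket + '}' * brace, True
-- ===== Notes on version B (the rewrite author's own statement) =====
-- stated objective: alternative
-- what changed: Replaces A's single forward state machine (in_string/escape_next flags plus per-char bracket counters) with a string-literal stripper that jumps indices over quoted bodies followed by plain str.count on the stripped text, and the backward range(len-1,-1,-1) index scan with a count of leading non-meaningful chars of reversed(s).
import Mathlib
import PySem

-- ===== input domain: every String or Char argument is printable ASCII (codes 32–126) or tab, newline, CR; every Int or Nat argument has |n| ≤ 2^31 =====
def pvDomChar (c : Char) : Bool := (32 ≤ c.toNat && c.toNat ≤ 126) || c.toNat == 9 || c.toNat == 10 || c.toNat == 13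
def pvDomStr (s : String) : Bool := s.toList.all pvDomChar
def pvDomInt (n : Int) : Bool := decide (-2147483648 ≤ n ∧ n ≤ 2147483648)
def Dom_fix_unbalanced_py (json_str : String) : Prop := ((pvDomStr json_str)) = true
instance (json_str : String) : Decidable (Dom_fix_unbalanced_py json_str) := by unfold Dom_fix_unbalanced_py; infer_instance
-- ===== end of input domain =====

-- B replaces A's char-by-char in_string/escape_next state machine by a string-literal
-- stripper (index jumps) followed by str.count, and the backward index scan by a
-- reversed-prefix count; objective: alternative decomposition, same asymptotic cost.

-- ===== PORT A =====
def aMeaningful (c : Char) : Bool :=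
  PySem.Chars.isIn [c] "}\"'0123456789".toList || PySem.Chars.isalpha c

-- backward loop: for i in range(len(stripped)-1, -1, -1): … break  (i = n-1 here)
def aScanBack (s : List Char) : Nat → Int
  | 0 => -1
  | n+1 => if aMeaningful (PySem.List.pyGetD s (n : Int) ' ') then (n : Int) else aScanBack s n

-- the counting for-loop over core, state (escape_next, in_string, brace_count, bracket_count)
def aCount : List Char → Bool → Bool → Int → Int → Int × Int
  | [], _, _, br, bk => (br, bk)
  | c :: rest, esc, ins, br, bk =>
    if esc then aCount rest false ins br bk
    else if c = '\\' ∧ ins then aCount rest true ins br bk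
    else if c = '"' then aCount rest esc (!ins) br bk
    else if !ins then
      if c = '{' then aCount rest esc ins (br + 1) bk
      else if c = '}' then aCount rest esc ins (br - 1) bk
      else if c = '[' then aCount rest esc ins br (bk + 1)
      else if c = ']' then aCount rest esc ins br (bk - 1)
      else aCount rest esc ins br bk
    else aCount rest esc ins br bk

-- while count > 0: fixed += ch; count -= 1
def aAppend (s : List Char) (ch : Char) (n : Int) : List Char :=
  if 0 < n then aAppend (s ++ [ch]) ch (n - 1) else s
termination_by n.toNat
decreasing_by omega

def fix_unbalanced_py (json_str : String) : String × Bool :=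
  if json_str.toList.isEmpty then ("", false)
  else
    let stripped := PySem.Chars.rstrip json_str.toList
    let idx := aScanBack stripped stripped.length
    if idx = -1 then ("", false)
    else
      let core := PySem.List.slice stripped none (some (idx + 1))
      match aCount core false false 0 0 with
      | (brace, bracket) =>
        (String.ofList (aAppend (aAppend core ']' bracket) '}' brace), true)

-- ===== PORT B =====
def bMeaningful (c : Char) : Bool :=
  PySem.Chars.isIn [c] "}\"'0123456789".toList || PySem.Chars.isalpha c

-- inner while of _strip_strings: skip a string body ('\\' jumps 2, '"' closes)
def bSkipStr (l : List Char) : List Char :=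
  match l with
  | [] => []
  | c :: rest =>
    if c = '"' then rest
    else if c = '\\' then bSkipStr rest.tail
    else bSkipStr rest
termination_by l.length
decreasing_by
  · simp only [List.length_cons, List.length_tail]; omega
  · simp

theorem bSkipStr_length_le (l : List Char) : (bSkipStr l).length ≤ l.length := by
  fun_induction bSkipStr l <;> simp_all [List.length_tail] <;> omega

-- outer while of _strip_strings: copy chars, delete string literals
def bStrip : List Char → List Char
  | [] => []
  | c :: rest => if c = '"' then bStrip (bSkipStr rest) else c :: bStrip rest
termination_by l => l.length
decreasing_by
  · have := bSkipStr_length_le rest; simp only [List.length_cons]; omega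
  · simp

-- the for-loop over reversed(s) counting leading non-meaningful chars (break on meaningful)
def bSkipCount : List Char → Nat
  | [] => 0
  | c :: rest => if bMeaningful c then 0 else bSkipCount rest + 1

def fix_unbalanced_py_alt (json_str : String) : String × Bool :=
  let s := PySem.Chars.rstrip json_str.toList
  let skip := bSkipCount s.reverse
  if skip = s.length then ("", false)
  else
    let core := PySem.List.slice s none (some ((s.length : Int) - skip))
    let body := bStrip core
    let brace : Int := (body.count '{' : Int) - (body.count '}' : Int)
    let bracket : Int := (body.count '[' : Int) - (body.count ']' : Int)
    (String.ofList (core ++ List.replicate bracket.toNat ']' ++ List.replicate brace.toNat '}'), true)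

-- ===== PRECONDITION & SPEC =====
def Spec_fix_unbalanced_py (json_str : String) (out : String × Bool) : Prop := out = fix_unbalanced_py_alt json_str
instance (json_str : String) (out : String × Bool) : Decidable (Spec_fix_unbalanced_py json_str out) := by unfold Spec_fix_unbalanced_py; infer_instance

-- ===== CLAIM (what is proved, stated in full; the proofs are below) =====
def Claim_equal_fix_unbalanced_py : Prop := ∀ (json_str : String), Dom_fix_unbalanced_py json_str → Spec_fix_unbalanced_py json_str (fix_unbalanced_py json_str)

-- ===== LEMMAS AND PROOFS =====

theorem scan_eq (s : List Char) : ∀ n : Nat, n ≤ s.length →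
    aScanBack s n = (n : Int) - 1 - (bSkipCount ((s.take n).reverse) : Int) ∧
    bSkipCount ((s.take n).reverse) ≤ n := by
  intro n
  induction n with
  | zero => intro _; simp [aScanBack, bSkipCount]
  | succ m ih =>
    intro h
    have hm : m < s.length := by omega
    have htake : (s.take (m+1)).reverse = s[m] :: (s.take m).reverse := by
      rw [List.take_add_one]
      simp [List.getElem?_eq_getElem hm]
    have hget : PySem.List.pyGetD s (m : Int) ' ' = s[m] := by
      simp [PySem.List.pyGetD_natCast, List.getD, List.getElem?_eq_getElem hm]
    obtain ⟨ih1, ih2⟩ := ih (by omega)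
    rw [aScanBack, htake, bSkipCount, hget]
    by_cases hme : bMeaningful s[m] = true
    · have : aMeaningful s[m] = true := hme
      simp [this, hme]
    · have : aMeaningful s[m] = false := by simpa using hme
      simp only [this, Bool.false_eq_true, if_false, hme, ih1]
      constructor
      · push_cast; ring
      · omega

theorem count_main : ∀ (fuel : Nat) (l : List Char), l.length ≤ fuel →
    (∀ br bk : Int, aCount l false false br bk =
      (br + ((bStrip l).count '{' : Int) - ((bStrip l).count '}' : Int),
       bk + ((bStrip l).count '[' : Int) - ((bStrip l).count ']' : Int))) ∧
    (∀ br bk : Int, aCount l false true br bk =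
      (br + ((bStrip (bSkipStr l)).count '{' : Int) - ((bStrip (bSkipStr l)).count '}' : Int),
       bk + ((bStrip (bSkipStr l)).count '[' : Int) - ((bStrip (bSkipStr l)).count ']' : Int))) := by
  intro fuel
  induction fuel with
  | zero =>
    intro l hl
    have hnil : l = [] := by cases l with | nil => rfl | cons c r => simp at hl
    subst hnil
    constructor <;> intro br bk <;> simp [aCount, bStrip, bSkipStr]
  | succ f ih =>
    intro l hl
    cases l with
    | nil => constructor <;> intro br bk <;> simp [aCount, bStrip, bSkipStr]
    | cons c rest =>
      have hr : rest.length ≤ f := by simp at hl; omega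
      constructor
      · -- in_string = false
        intro br bk
        by_cases hq : c = '"'
        · subst hq
          have step : aCount ('"' :: rest) false false br bk = aCount rest false true br bk := by
            simp [aCount]
          have hb : bStrip ('"' :: rest) = bStrip (bSkipStr rest) := by simp [bStrip]
          rw [step, (ih rest hr).2 br bk, hb]
        · have hb : bStrip (c :: rest) = c :: bStrip rest := by rw [bStrip, if_neg hq]
          rw [hb]
          by_cases h1 : c = '{'
          · subst h1
            have step : aCount ('{' :: rest) false false br bk
                = aCount rest false false (br + 1) bk := by simp [aCount]
            rw [step, (ih rest hr).1 (br + 1) bk]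
            simp [Prod.ext_iff]
            all_goals omega
          · by_cases h2 : c = '}'
            · subst h2
              have step : aCount ('}' :: rest) false false br bk
                  = aCount rest false false (br - 1) bk := by simp [aCount]
              rw [step, (ih rest hr).1 (br - 1) bk]
              simp [Prod.ext_iff]
              all_goals omega
            · by_cases h3 : c = '['
              · subst h3
                have step : aCount ('[' :: rest) false false br bk
                    = aCount rest false false br (bk + 1) := by simp [aCount]
                rw [step, (ih rest hr).1 br (bk + 1)]
                simp [Prod.ext_iff]
                all_goals omega
              · by_cases h4 : c = ']'
                · subst h4
                  have step : aCount (']' :: rest) false false br bk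
                      = aCount rest false false br (bk - 1) := by simp [aCount]
                  rw [step, (ih rest hr).1 br (bk - 1)]
                  simp [Prod.ext_iff]
                  all_goals omega
                · have step : aCount (c :: rest) false false br bk
                      = aCount rest false false br bk := by
                    simp [aCount, hq, h1, h2, h3, h4]
                  rw [step, (ih rest hr).1 br bk]
                  simp [h1, h2, h3, h4]
      · -- in_string = true
        intro br bk
        by_cases hq : c = '"'
        · subst hq
          have step : aCount ('"' :: rest) false true br bk = aCount rest false false br bk := by
            simp [aCount]
          have hsk : bSkipStr ('"' :: rest) = rest := by rw [bSkipStr]; simp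
          rw [step, hsk]
          exact (ih rest hr).1 br bk
        · by_cases hbsl : c = '\\'
          · subst hbsl
            have hsk : bSkipStr ('\\' :: rest) = bSkipStr rest.tail := by
              rw [bSkipStr]; simp
            rw [hsk]
            cases rest with
            | nil => simp [aCount, bSkipStr, bStrip]
            | cons c2 r2 =>
              have hr2 : r2.length ≤ f := by simp at hl; omega
              have step : aCount ('\\' :: c2 :: r2) false true br bk
                  = aCount r2 false true br bk := by simp [aCount]
              rw [step, List.tail_cons]
              exact (ih r2 hr2).2 br bk
          · have step : aCount (c :: rest) false true br bk
                = aCount rest false true br bk := by simp [aCount, hq, hbsl]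
            have hsk : bSkipStr (c :: rest) = bSkipStr rest := by
              rw [bSkipStr, if_neg hq, if_neg hbsl]
            rw [step, hsk]
            exact (ih rest hr).2 br bk

theorem append_eq : ∀ (k : Nat) (n : Int) (s : List Char) (c : Char), n.toNat ≤ k →
    aAppend s c n = s ++ List.replicate n.toNat c := by
  intro k
  induction k with
  | zero =>
    intro n s c h
    rw [aAppend]
    have hn : ¬ 0 < n := by omega
    have h0 : n.toNat = 0 := by omega
    simp [hn, h0]
  | succ m ih =>
    intro n s c h
    rw [aAppend]
    by_cases hn : 0 < n
    · rw [if_pos hn, ih (n - 1) (s ++ [c]) c (by omega)]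
      have h1 : n.toNat = (n - 1).toNat + 1 := by omega
      rw [h1, List.replicate_succ, List.append_assoc]
      rfl
    · have h0 : n.toNat = 0 := by omega
      simp [hn, h0]

theorem append_eq' (s : List Char) (c : Char) (n : Int) :
    aAppend s c n = s ++ List.replicate n.toNat c :=
  append_eq n.toNat n s c (le_refl _)

-- ===== VERDICT (by name: the statement is the Claim_ definition above) =====
theorem fix_unbalanced_py_spec : Claim_equal_fix_unbalanced_py := by
  intro json_str _
  unfold Spec_fix_unbalanced_py fix_unbalanced_py fix_unbalanced_py_alt
  by_cases h0 : json_str.toList.isEmpty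
  · have he : json_str.toList = [] := by simpa [List.isEmpty_iff] using h0
    simp [he, bSkipCount, PySem.Chars.rstrip]
  · simp only [h0, Bool.false_eq_true, if_false]
    set st := PySem.Chars.rstrip json_str.toList with hst
    have hscan := scan_eq st st.length (le_refl _)
    rw [List.take_length] at hscan
    obtain ⟨h1, h2⟩ := hscan
    set k := bSkipCount st.reverse with hk
    by_cases hke : k = st.length
    · have : aScanBack st st.length = -1 := by rw [h1, hke]; ring
      simp [this, hke]
    · have hklt : k < st.length := by omega
      have hidx : aScanBack st st.length ≠ -1 := by rw [h1]; omega
      rw [if_neg hidx, if_neg hke]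
      have hbound : aScanBack st st.length + 1 = (st.length : Int) - k := by
        rw [h1]; ring
      rw [hbound]
      set core := PySem.List.slice st none (some ((st.length : Int) - k)) with hcore
      have hcnt := (count_main core.length core (le_refl _)).1 0 0
      rw [hcnt]
      rw [append_eq', append_eq']
      simp [List.append_assoc]
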